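-- pv_equiv track=rewrite | github.com/Harshk10-star/advent-of-code-2023 | day4/day4Part1.py | get_card_count
-- ===== SOURCE A (Python) =====
-- def get_card_count(arr):
--     separate_index = arr.index('|')
--     count = 0
--     value_set = set(arr[separate_index + 1:])
--     for i in range(separate_index):
--         if arr[i] in value_set:
--             if count == 0:
--                 count = 1
--             else:
--                 count = count * 2
--     return count
-- ===== SOURCE B (Python) =====
-- def get_card_count(arr):
--     separate_index = arr.index('|')
--     winning = arr[:separate_index]
--     matches = 0
--     for v in set(arr[separate_index + 1:]):
--         matches += winning.count(v)
--     return 0 if matches == 0 else 1 << (matches - 1)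
-- ===== Notes on version B (the rewrite author's own statement) =====
-- stated objective: alternative
-- what changed: Instead of scanning the prefix with a set-membership test and a stateful doubling accumulator, B iterates over the DISTINCT tail values and sums winning.count(v) occurrence counts over the prefix, then returns the closed form 0 / 1 << (matches-1).
import Mathlib
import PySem

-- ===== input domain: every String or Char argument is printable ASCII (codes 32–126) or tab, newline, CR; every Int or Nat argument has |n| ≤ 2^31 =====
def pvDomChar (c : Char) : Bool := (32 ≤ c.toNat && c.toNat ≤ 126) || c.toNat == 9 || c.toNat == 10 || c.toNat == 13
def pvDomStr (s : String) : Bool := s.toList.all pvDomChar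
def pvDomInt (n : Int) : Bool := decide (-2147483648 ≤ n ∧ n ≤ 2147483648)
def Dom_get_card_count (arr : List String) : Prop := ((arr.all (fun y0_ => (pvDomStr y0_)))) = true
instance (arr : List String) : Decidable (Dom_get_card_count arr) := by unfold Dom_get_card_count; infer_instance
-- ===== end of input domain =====

-- B replaces A's prefix scan with set membership and stateful doubling accumulator by summing
-- occurrence counts of the DISTINCT tail values over the prefix, then the closed form 0 / 1<<(m-1);
-- equivalence of the RETURN value is proved on inputs containing '|'.

-- ===== PORT A =====
def get_card_count (arr : List String) : Int :=
  match PySem.List.index? arr "|" with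
  | none => 0        -- Python raises ValueError here; excluded by Pre_
  | some separate_index =>
    let value_set : PySem.Set String :=
      PySem.Set.ofList (PySem.List.slice arr (some ((separate_index : Int) + 1)) none)
    -- for i in range(separate_index): indices are always in range, so pyGetD is exact
    (PySem.List.pyRange 0 (separate_index : Int) 1).foldl
      (fun count i =>
        if PySem.List.pyGetD arr i "" ∈ value_set then
          if count = 0 then 1 else count * 2
        else count) 0

-- ===== PORT B =====
def get_card_count_alt (arr : List String) : Int :=
  match PySem.List.index? arr "|" with
  | none => 0        -- Python raises ValueError here; excluded by Pre_
  | some separate_index =>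
    let winning := PySem.List.slice arr none (some (separate_index : Int))
    -- for v in set(tail): nmatches += winning.count(v)
    let nmatches : Int :=
      (PySem.Set.ofList (PySem.List.slice arr (some ((separate_index : Int) + 1)) none)).foldl
        (fun m v => m + (PySem.List.count winning v : Int)) 0
    -- 1 << (nmatches - 1): nmatches ≥ 1 in this branch, so .toNat is exact
    if nmatches = 0 then 0 else (1 : Int) <<< (nmatches - 1).toNat

-- ===== PRECONDITION & SPEC =====
-- Pre_ excludes exactly the inputs with no '|', on which Python A raises ValueError.
def Pre_get_card_count (arr : List String) : Prop := "|" ∈ arr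
instance (arr : List String) : Decidable (Pre_get_card_count arr) := by unfold Pre_get_card_count; infer_instance
def pvWitness_get_card_count : List String := ["1", "2", "|", "2", "3"]

def Spec_get_card_count (arr : List String) (out : Int) : Prop := out = get_card_count_alt arr
instance (arr : List String) (out : Int) : Decidable (Spec_get_card_count arr out) := by unfold Spec_get_card_count; infer_instance

-- ===== CLAIM (what is proved, stated in full; the proofs are below) =====
def Claim_equal_get_card_count : Prop := ∀ (arr : List String), Dom_get_card_count arr → Pre_get_card_count arr → Spec_get_card_count arr (get_card_count arr)

-- ===== LEMMAS AND PROOFS =====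

-- closed form for A's accumulator after k nmatches
def pvCF (k : Nat) : Int := if k = 0 then 0 else 2 ^ (k - 1)

theorem pvCF_succ (k : Nat) :
    (if pvCF k = 0 then (1 : Int) else pvCF k * 2) = pvCF (k + 1) := by
  cases k with
  | zero => simp [pvCF]
  | succ n =>
    have h : pvCF (n + 1) = 2 ^ n := by simp [pvCF]
    have hpos : (0 : Int) < 2 ^ n := by positivity
    rw [h]
    rw [if_neg (by omega)]
    simp [pvCF, pow_succ]

-- A's doubling fold equals the closed form on the number of nmatches
theorem pvFold_cf {α : Type} (p : α → Prop) [DecidablePred p] (l : List α) (k : Nat) :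
    l.foldl (fun c x => if p x then (if c = 0 then (1 : Int) else c * 2) else c) (pvCF k)
      = pvCF (k + (l.filter (fun x => decide (p x))).length) := by
  induction l generalizing k with
  | nil => simp
  | cons x t ih =>
    by_cases hx : p x
    · have := ih (k + 1)
      simpa [hx, pvCF_succ, Nat.add_assoc, Nat.add_comm 1] using this
    · simpa [hx] using ih k

-- indicator sum over a duplicate-free list
theorem pvSum_indicator (y : String) (S : List String) (hS : S.Nodup) :
    (S.map (fun v => if y = v then (1 : Int) else 0)).sum = if y ∈ S then 1 else 0 := by
  induction S with
  | nil => simp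
  | cons x t ih =>
    rcases List.nodup_cons.mp hS with ⟨hx, ht⟩
    by_cases h : y = x
    · subst h
      simp [List.sum_cons, ih ht, hx]
    · simp [List.sum_cons, h, ih ht]

-- summing per-value counts over the distinct values of S counts the elements of l lying in S
theorem pvSum_count (S : List String) (hS : S.Nodup) (l : List String) :
    (S.map (fun v => (l.count v : Int))).sum = ((l.filter (fun x => decide (x ∈ S))).length : Int) := by
  induction l with
  | nil => simp
  | cons y t ih =>
    have hc : ∀ v, ((y :: t).count v : Int)
        = (t.count v : Int) + (if y = v then 1 else 0) := by
      intro v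
      by_cases h : y = v <;> simp [h]
    calc (S.map (fun v => ((y :: t).count v : Int))).sum
        = (S.map (fun v => (t.count v : Int) + (if y = v then (1 : Int) else 0))).sum := by
          simp only [hc]
      _ = (S.map (fun v => (t.count v : Int))).sum
            + (S.map (fun v => if y = v then (1 : Int) else 0)).sum := by
          rw [← List.sum_map_add]
      _ = ((t.filter (fun x => decide (x ∈ S))).length : Int) + (if y ∈ S then 1 else 0) := by
          rw [ih, pvSum_indicator y S hS]
      _ = (((y :: t).filter (fun x => decide (x ∈ S))).length : Int) := by
          by_cases h : y ∈ S <;> simp [h]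

-- B's answer written through pvCF
theorem pvCF_shift (k : Nat) :
    (if (k : Int) = 0 then (0 : Int) else (1 : Int) <<< ((k : Int) - 1).toNat) = pvCF k := by
  cases k with
  | zero => simp [pvCF]
  | succ n =>
    have h1 : ((n + 1 : Nat) : Int) ≠ 0 := by omega
    have h2 : (((n + 1 : Nat) : Int) - 1).toNat = n := by omega
    simp only [h1, pvCF, Nat.succ_ne_zero, Nat.add_sub_cancel, h2]
    simp [Int.shiftLeft_eq, one_mul]

theorem get_card_count_spec : Claim_equal_get_card_count := by
  intro arr _ hpre
  have hsome : ∃ k, PySem.List.index? arr "|" = some k := by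
    rcases Option.isSome_iff_exists.mp
      ((PySem.List.index?_isSome_iff arr "|").mpr hpre) with ⟨k, hk⟩
    exact ⟨k, hk⟩
  rcases hsome with ⟨sep, hsep⟩
  obtain ⟨hlt, _, _⟩ := PySem.List.getElem_of_index?_eq_some hsep
  unfold Spec_get_card_count get_card_count get_card_count_alt
  rw [hsep]
  simp only
  -- rewrite A's indexed loop into a fold over the prefix arr.take sep
  have htake : ∀ (vs : PySem.Set String),
      (PySem.List.pyRange 0 (sep : Int) 1).foldl
        (fun count i => if PySem.List.pyGetD arr i "" ∈ vs then
            (if count = 0 then (1 : Int) else count * 2) else count) 0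
      = (arr.take sep).foldl
        (fun count x => if x ∈ vs then
            (if count = 0 then (1 : Int) else count * 2) else count) 0 := by
    intro vs
    have hcong := PySem.List.foldl_congr_mem
      (l := PySem.List.pyRange 0 (sep : Int) 1) (init := (0 : Int))
      (f := fun count i => if PySem.List.pyGetD arr i "" ∈ vs then
          (if count = 0 then (1 : Int) else count * 2) else count)
      (g := fun count i => if PySem.List.pyGetD (arr.take sep) i "" ∈ vs then
          (if count = 0 then (1 : Int) else count * 2) else count)
      (by
        intro acc i hi
        have hmem := (PySem.List.mem_pyRange_one).mp hi
        have h0 : 0 ≤ i := hmem.1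
        have hisep : i < (sep : Int) := hmem.2
        have hlt' : i.toNat < sep := by omega
        have hi' : i = ((i.toNat : Nat) : Int) := (Int.toNat_of_nonneg h0).symm
        have : PySem.List.pyGetD arr i "" = PySem.List.pyGetD (arr.take sep) i "" := by
          rw [hi', PySem.List.pyGetD_natCast, PySem.List.pyGetD_natCast]
          simp [List.getD_eq_getElem?_getD, hlt']
        simp only [this])
    rw [hcong]
    have hlen : ((arr.take sep).length : Int) = (sep : Int) := by
      simp [List.length_take]; omega
    rw [← hlen]
    exact PySem.List.foldl_pyRange_zero_pyGetD' (arr.take sep) ""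
      (fun count x => if x ∈ vs then
          (if count = 0 then (1 : Int) else count * 2) else count) 0
  rw [htake]
  set S : PySem.Set String :=
    PySem.Set.ofList (PySem.List.slice arr (some ((sep : Int) + 1)) none) with hS
  -- A's side: the prefix fold equals the closed form on the number of nmatches
  have hA := pvFold_cf (fun x => x ∈ S) (arr.take sep) 0
  simp only [Nat.zero_add] at hA
  rw [show pvCF 0 = (0 : Int) from rfl] at hA
  rw [hA]
  -- B's side: the count-summing loop computes the same number of nmatches
  have hslice : PySem.List.slice arr none (some (sep : Int)) = arr.take sep :=
    PySem.List.slice_to_natCast arr sep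
  have hnodup : S.Nodup := PySem.Set.nodup_ofList _
  have hBsum : S.foldl (fun m v => m + (PySem.List.count (arr.take sep) v : Int)) 0
      = ((((arr.take sep)).filter (fun x => decide (x ∈ S))).length : Int) := by
    rw [PySem.List.foldl_add]
    simp only [zero_add]
    have : ∀ v, PySem.List.count (arr.take sep) v = (arr.take sep).count v := by
      intro v; simp [PySem.List.count_eq]
    simp only [this]
    exact pvSum_count S hnodup (arr.take sep)
  rw [hslice, hBsum]
  exact (pvCF_shift _).symm

-- ===== VERDICT =====
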